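-- pv_equiv track=rewrite | github.com/ss945601/LogTool | analysisLog.py | getNetworkSwitchTimeStamp
-- ===== SOURCE A (Python) =====
-- def getNetworkSwitchTimeStamp(analysisLog):
--     infoLines = analysisLog.split("\n")
--     network  = "";
--     time ="";
--     strNetworkSwitch = "///////////////////////////////////\n網路切換時機\n";
--     switchToInLotState = "";
--     for line in infoLines:
--         time = line.split("||")[0]
--         if network == "" and "Network" in line:
--             network = line.split(" ")[-1]
--             strNetworkSwitch = strNetworkSwitch + time + network + " (first)\n"
--         else:
--             if "Network" in line and network != line.split(" ")[-1]:
--                 network = line.split(" ")[-1]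
--                 strNetworkSwitch = strNetworkSwitch + time + network + "\n"
--
--     return strNetworkSwitch
-- ===== SOURCE B (Python) =====
-- def getNetworkSwitchTimeStamp(analysisLog):
--     # Stateless formulation: pair each 'Network' event with its predecessor's
--     # trailing token (a leading "" stands for 'no event yet') and join the pieces.
--     nets = [l for l in analysisLog.split("\n") if "Network" in l]
--     times = [l.split("||")[0] for l in nets]
--     names = [l.split(" ")[-1] for l in nets]
--     prevs = [""] + names[:-1]
--     pieces = ["///////////////////////////////////\n網路切換時機\n"]
--     pieces += [t + n + " (first)\n" if p == "" else (t + n + "\n" if n != p else "")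
--                for p, t, n in zip(prevs, times, names)]
--     return "".join(pieces)
-- ===== Notes on version B (the rewrite author's own statement) =====
-- stated objective: alternative
-- what changed: B replaces A's stateful loop (a current-network accumulator threaded through branches) by a stateless formulation: it extracts the times and trailing tokens of the marker lines, zips the token list with its own shifted-by-one copy (prefixed by the empty sentinel), maps each (prev, time, name) triple independently to its output piece, and joins the pieces.
import Mathlib
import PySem

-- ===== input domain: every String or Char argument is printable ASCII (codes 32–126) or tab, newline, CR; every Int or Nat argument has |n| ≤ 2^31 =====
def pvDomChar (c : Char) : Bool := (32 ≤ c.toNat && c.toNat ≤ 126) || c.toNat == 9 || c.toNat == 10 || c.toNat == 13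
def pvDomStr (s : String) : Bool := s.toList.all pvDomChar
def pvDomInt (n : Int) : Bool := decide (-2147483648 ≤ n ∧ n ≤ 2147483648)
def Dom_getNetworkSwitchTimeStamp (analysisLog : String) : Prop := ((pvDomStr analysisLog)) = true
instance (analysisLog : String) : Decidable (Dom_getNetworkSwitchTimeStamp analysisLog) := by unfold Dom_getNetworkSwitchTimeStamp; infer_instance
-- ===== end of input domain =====

-- B recasts A as a stateless zip-with-predecessor over the 'Network' events (no loop-carried accumulator), joined at the end; return values proved equal on Dom.


-- ===== PORT A =====
-- line.split("||")[0]: split with a nonempty separator is never empty, so the [0] never raises; ported with pyGetD (default unreachable)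
def pvTimeOf (line : String) : String := PySem.List.pyGetD ((PySem.Str.split? line "||").getD []) 0 ""
-- line.split(" ")[-1]: same, the [-1] never raises
def pvNameOf (line : String) : String := PySem.List.pyGetD ((PySem.Str.split? line " ").getD []) (-1) ""

-- one iteration of A's loop: state = (network, strNetworkSwitch); `time` is recomputed from the line each turn
def pvStepA (st : String × String) (line : String) : String × String :=
  let time := pvTimeOf line
  if st.1 == "" && PySem.Str.isIn "Network" line then
    let nw := pvNameOf line
    (nw, st.2 ++ time ++ nw ++ " (first)\n")
  else if PySem.Str.isIn "Network" line && !(st.1 == pvNameOf line) then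
    let nw := pvNameOf line
    (nw, st.2 ++ time ++ nw ++ "\n")
  else st

def getNetworkSwitchTimeStamp (analysisLog : String) : String :=
  (((PySem.Str.split? analysisLog "\n").getD []).foldl pvStepA
    ("", "///////////////////////////////////\n網路切換時機\n")).2

-- ===== PORT B =====
-- Source B's comprehension body: one (prev, (time, name)) triple mapped to its output piece, statelessly
def pvPieceB (ptn : String × String × String) : String :=
  if ptn.1 == "" then ptn.2.1 ++ ptn.2.2 ++ " (first)\n"
  else if ptn.2.2 != ptn.1 then ptn.2.1 ++ ptn.2.2 ++ "\n"
  else ""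

def getNetworkSwitchTimeStamp_alt (analysisLog : String) : String :=
  let nets := ((PySem.Str.split? analysisLog "\n").getD []).filter (fun l => PySem.Str.isIn "Network" l)
  let times := nets.map pvTimeOf
  let names := nets.map pvNameOf
  let prevs := "" :: PySem.List.slice names none (some (-1))     -- [""] + names[:-1]
  let pieces := "///////////////////////////////////\n網路切換時機\n" ::
    (prevs.zip (times.zip names)).map pvPieceB
  PySem.Str.join "" pieces

-- ===== PRECONDITION & SPEC =====
def Spec_getNetworkSwitchTimeStamp (analysisLog : String) (out : String) : Prop := out = getNetworkSwitchTimeStamp_alt analysisLog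
instance (analysisLog : String) (out : String) : Decidable (Spec_getNetworkSwitchTimeStamp analysisLog out) := by unfold Spec_getNetworkSwitchTimeStamp; infer_instance

-- ===== CLAIM (what is proved, stated in full; the proofs are below) =====
def Claim_equal_getNetworkSwitchTimeStamp : Prop := ∀ (analysisLog : String), Dom_getNetworkSwitchTimeStamp analysisLog → Spec_getNetworkSwitchTimeStamp analysisLog (getNetworkSwitchTimeStamp analysisLog)

-- ===== LEMMAS AND PROOFS =====
-- ''.join distributes over cons
theorem pv_join_empty_cons (x : String) (l : List String) :
    PySem.Str.join "" (x :: l) = x ++ PySem.Str.join "" l := by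
  rw [← String.toList_inj]
  cases l <;> simp [PySem.Str.toList_join, PySem.Chars.join_singleton,
    PySem.Chars.join_cons_cons, PySem.Chars.join_nil]

theorem pv_join_empty_nil : PySem.Str.join "" ([] : List String) = "" := by
  rw [← String.toList_inj]; simp [PySem.Str.toList_join, PySem.Chars.join_nil]

-- proof-side recursive description of the per-event pieces with a running predecessor
def pvG (p : String) : List String → List String
  | [] => []
  | l :: ls => pvPieceB (p, pvTimeOf l, pvNameOf l) :: pvG (pvNameOf l) ls

-- B's zip-with-predecessor equals pvG
theorem pv_zip_eq_g (nets : List String) (p : String) :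
    ((p :: (nets.map pvNameOf).dropLast).zip ((nets.map pvTimeOf).zip (nets.map pvNameOf))).map pvPieceB
      = pvG p nets := by
  induction nets generalizing p with
  | nil => rfl
  | cons l ls ih =>
    cases ls with
    | nil => rfl
    | cons l' ls' =>
      have h := ih (pvNameOf l)
      simp only [List.map_cons, List.dropLast_cons₂, List.zip_cons_cons, pvG] at h ⊢
      rw [h]

-- A's fold equals hdr-so-far ++ joined pieces of the remaining 'Network' lines
theorem pv_foldA_eq_g (lines : List String) (nw out : String) :
    (lines.foldl pvStepA (nw, out)).2
      = out ++ PySem.Str.join "" (pvG nw (lines.filter (fun l => PySem.Str.isIn "Network" l))) := by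
  induction lines generalizing nw out with
  | nil => simp [pvG, pv_join_empty_nil]
  | cons l ls ih =>
    by_cases hN : PySem.Str.isIn "Network" l = true
    · have hN' : PySem.Chars.isIn ['N','e','t','w','o','r','k'] l.toList = true := by
        simpa using hN
      simp only [List.foldl_cons, List.filter_cons, hN, if_pos, pvG, pv_join_empty_cons]
      by_cases hE : nw = ""
      · have : pvStepA (nw, out) l
            = (pvNameOf l, out ++ pvTimeOf l ++ pvNameOf l ++ " (first)\n") := by
          simp [pvStepA, hE, hN']
        rw [this, ih]
        simp [pvPieceB, hE, String.append_assoc]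
      · by_cases hEq : pvNameOf l = nw
        · have : pvStepA (nw, out) l = (nw, out) := by
            simp [pvStepA, hE, hN', hEq]
          rw [this, ih, hEq]
          simp [pvPieceB, hE]
        · have hEq' : ¬nw = pvNameOf l := fun h => hEq h.symm
          have : pvStepA (nw, out) l
              = (pvNameOf l, out ++ pvTimeOf l ++ pvNameOf l ++ "\n") := by
            simp [pvStepA, hE, hN', hEq']
          rw [this, ih]
          simp [pvPieceB, hE, hEq, String.append_assoc]
    · simp only [Bool.not_eq_true] at hN
      have hN' : PySem.Chars.isIn ['N','e','t','w','o','r','k'] l.toList = false := by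
        simpa using hN
      have hStep : pvStepA (nw, out) l = (nw, out) := by
        simp [pvStepA, hN']
      simp only [List.foldl_cons, hStep, List.filter_cons, hN]
      simpa using ih nw out

-- ===== VERDICT (by name: the statement is the Claim_ definition above) =====
theorem getNetworkSwitchTimeStamp_spec : Claim_equal_getNetworkSwitchTimeStamp := by
  intro s _
  unfold Spec_getNetworkSwitchTimeStamp getNetworkSwitchTimeStamp getNetworkSwitchTimeStamp_alt
  dsimp only
  rw [pv_foldA_eq_g, PySem.List.slice_to_neg_one, pv_join_empty_cons, pv_zip_eq_g]
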